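-- pv_equiv track=rewrite | github.com/raymondclowe/ttslo | dashboard.py | _extract_quote_asset
-- ===== SOURCE A (Python) =====
-- def _extract_quote_asset(pair: str) -> str:
--     """
--     Extract the quote asset from a trading pair.
--
--     Args:
--         pair: Trading pair (e.g., 'XXBTZUSD', 'XETHZUSD', 'DYDXUSD')
--
--     Returns:
--         Quote asset code (e.g., 'ZUSD', 'EUR') normalized to Kraken's internal notation
--
--     Note:
--         Kraken uses 'Z' prefix for fiat currencies in API responses:
--         - USD → ZUSD
--         - EUR → ZEUR
--         - GBP → ZGBP
--         - JPY → ZJPY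
--     """
--     # Try to extract from pattern
--     # Note: Order matters - check longer suffixes first (e.g., USDT before USD)
--     for quote in ['USDT', 'ZUSD', 'ZEUR', 'EUR', 'ZGBP', 'GBP', 'ZJPY', 'JPY', 'USD']:
--         if pair.endswith(quote):
--             # Normalize to Kraken's internal notation (Z-prefixed for fiat)
--             if quote == 'USD':
--                 return 'ZUSD'
--             elif quote == 'EUR':
--                 return 'ZEUR'
--             elif quote == 'GBP':
--                 return 'ZGBP'
--             elif quote == 'JPY':
--                 return 'ZJPY'
--             else:
--                 return quote
--
--     return ''
-- ===== SOURCE B (Python) =====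
-- _QUOTE_MAP = {
--     'USDT': 'USDT', 'ZUSD': 'ZUSD', 'ZEUR': 'ZEUR', 'ZGBP': 'ZGBP', 'ZJPY': 'ZJPY',
--     'USD': 'ZUSD', 'EUR': 'ZEUR', 'GBP': 'ZGBP', 'JPY': 'ZJPY',
-- }
--
-- def _extract_quote_asset(pair: str) -> str:
--     # All known quote suffixes are length 4 or 3; longest-first priority
--     # becomes a length priority with a single table lookup per length.
--     for n in (4, 3):
--         hit = _QUOTE_MAP.get(pair[-n:])
--         if hit is not None:
--             return hit
--     return ''
-- ===== Notes on version B (the rewrite author's own statement) =====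
-- stated objective: simpler
-- what changed: Replaces the nine-iteration endswith loop with per-suffix normalization branches by a single suffix->normalized-code dict probed at the two candidate suffix lengths (4, then 3) via one slice + lookup each.
import Mathlib
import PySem

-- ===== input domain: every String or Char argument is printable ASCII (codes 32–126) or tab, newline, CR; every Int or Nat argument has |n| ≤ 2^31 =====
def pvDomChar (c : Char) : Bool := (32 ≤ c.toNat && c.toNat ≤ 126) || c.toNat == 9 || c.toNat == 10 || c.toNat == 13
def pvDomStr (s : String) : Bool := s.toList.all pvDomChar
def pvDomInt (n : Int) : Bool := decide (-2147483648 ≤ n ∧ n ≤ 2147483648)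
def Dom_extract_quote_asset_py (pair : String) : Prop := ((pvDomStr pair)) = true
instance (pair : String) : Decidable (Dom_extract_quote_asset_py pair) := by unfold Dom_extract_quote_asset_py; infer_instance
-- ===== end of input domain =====

-- B replaces A's per-suffix endswith chain by one suffix→code table probed at the
-- two suffix lengths (4 then 3); objective: simpler (equal return value proved below).


-- ===== PORT A =====
-- A's for-loop with early return, as structural recursion over the same suffix list
def pvQuoteLoopA (pair : String) : List String → String
  | [] => ""
  | quote :: rest =>
    if PySem.Str.endswith pair quote then
      if quote == "USD" then "ZUSD"
      else if quote == "EUR" then "ZEUR"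
      else if quote == "GBP" then "ZGBP"
      else if quote == "JPY" then "ZJPY"
      else quote
    else pvQuoteLoopA pair rest

def extract_quote_asset_py (pair : String) : String :=
  pvQuoteLoopA pair ["USDT", "ZUSD", "ZEUR", "EUR", "ZGBP", "GBP", "ZJPY", "JPY", "USD"]

-- ===== PORT B =====
-- Source B's module-level dict literal
def pvQuoteMap : PySem.Dict String String :=
  PySem.Dict.ofList
    [("USDT", "USDT"), ("ZUSD", "ZUSD"), ("ZEUR", "ZEUR"), ("ZGBP", "ZGBP"), ("ZJPY", "ZJPY"),
     ("USD", "ZUSD"), ("EUR", "ZEUR"), ("GBP", "ZGBP"), ("JPY", "ZJPY")]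

-- Source B's loop over the candidate suffix lengths (4, 3): slice pair[-n:], table lookup
def pvQuoteLoopB (pair : String) : List Int → String
  | [] => ""
  | n :: rest =>
    match PySem.Dict.get? pvQuoteMap (PySem.Str.slice pair (some (-n)) none) with
    | some hit => hit
    | none => pvQuoteLoopB pair rest

def extract_quote_asset_py_alt (pair : String) : String :=
  pvQuoteLoopB pair [4, 3]

-- ===== PRECONDITION & SPEC =====
def Spec_extract_quote_asset_py (pair : String) (out : String) : Prop := out = extract_quote_asset_py_alt pair
instance (pair : String) (out : String) : Decidable (Spec_extract_quote_asset_py pair out) := by unfold Spec_extract_quote_asset_py; infer_instance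

-- ===== CLAIM (what is proved, stated in full; the proofs are below) =====
def Claim_equal_extract_quote_asset_py : Prop := ∀ (pair : String), Dom_extract_quote_asset_py pair → Spec_extract_quote_asset_py pair (extract_quote_asset_py pair)

-- ===== LEMMAS AND PROOFS =====

-- A's chain of endswith tests, phrased over the character list
def pvChainA (s : List Char) : String :=
  if "USDT".toList <:+ s then "USDT"
  else if "ZUSD".toList <:+ s then "ZUSD"
  else if "ZEUR".toList <:+ s then "ZEUR"
  else if "EUR".toList <:+ s then "ZEUR"
  else if "ZGBP".toList <:+ s then "ZGBP"
  else if "GBP".toList <:+ s then "ZGBP"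
  else if "ZJPY".toList <:+ s then "ZJPY"
  else if "JPY".toList <:+ s then "ZJPY"
  else if "USD".toList <:+ s then "ZUSD"
  else ""

-- B's two table probes, phrased over the character list
def pvChainB (s : List Char) : String :=
  if "USDT".toList <:+ s then "USDT"
  else if "ZUSD".toList <:+ s then "ZUSD"
  else if "ZEUR".toList <:+ s then "ZEUR"
  else if "ZGBP".toList <:+ s then "ZGBP"
  else if "ZJPY".toList <:+ s then "ZJPY"
  else if s = "USD".toList then "ZUSD"
  else if s = "EUR".toList then "ZEUR"
  else if s = "GBP".toList then "ZGBP"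
  else if s = "JPY".toList then "ZJPY"
  else if "USD".toList <:+ s then "ZUSD"
  else if "EUR".toList <:+ s then "ZEUR"
  else if "GBP".toList <:+ s then "ZGBP"
  else if "JPY".toList <:+ s then "ZJPY"
  else ""

-- a drop from the end equals w iff w is a suffix
theorem pv_drop_eq_iff_suffix (s w : List Char) :
    s.drop (s.length - w.length) = w ↔ w <:+ s := by
  constructor
  · intro h; exact h ▸ List.drop_suffix _ _
  · rintro ⟨t, rfl⟩
    simp

-- two suffixes of equal length are equal
theorem pv_suffix_eq {s w₁ w₂ : List Char} (h₁ : w₁ <:+ s) (h₂ : w₂ <:+ s)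
    (h : w₁.length = w₂.length) : w₁ = w₂ := by
  have e₁ := (pv_drop_eq_iff_suffix s w₁).mpr h₁
  have e₂ := (pv_drop_eq_iff_suffix s w₂).mpr h₂
  rw [← e₁, ← e₂, h]

-- two distinct words of equal length cannot both be suffixes
theorem pv_ne3 {s a b : List Char} (ha : a <:+ s) (hb : b <:+ s)
    (hl : a.length = b.length) (hab : a ≠ b) : False := hab (pv_suffix_eq ha hb hl)

theorem pv_eq_drop4_iff (s w : List Char) (hw : w.length = 4) :
    (w = s.drop (s.length - 4)) ↔ w <:+ s := by
  rw [eq_comm, ← hw, pv_drop_eq_iff_suffix]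

theorem pv_eq_drop4_three (s w : List Char) (hw : w.length = 3) :
    (w = s.drop (s.length - 4)) ↔ s = w := by
  constructor
  · intro h
    have hl := congrArg List.length h.symm
    rw [List.length_drop, hw] at hl
    have hz : s.length - 4 = 0 := by omega
    rw [hz, List.drop_zero] at h
    exact h.symm
  · intro h
    rw [h, hw]
    simp

theorem pv_eq_drop3_iff (s w : List Char) (hw : w.length = 3) :
    (w = s.drop (s.length - 3)) ↔ w <:+ s := by
  rw [eq_comm, ← hw, pv_drop_eq_iff_suffix]

theorem pv_eq_drop3_four (s w : List Char) (hw : w.length = 4) :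
    (w = s.drop (s.length - 3)) ↔ False := by
  simp only [iff_false]
  intro h
  have hl := congrArg List.length h.symm
  rw [List.length_drop, hw] at hl
  omega

theorem get?_pvQuoteMap (k : String) : pvQuoteMap.get? k =
    if "USDT".toList = k.toList then some "USDT"
    else if "ZUSD".toList = k.toList then some "ZUSD"
    else if "ZEUR".toList = k.toList then some "ZEUR"
    else if "ZGBP".toList = k.toList then some "ZGBP"
    else if "ZJPY".toList = k.toList then some "ZJPY"
    else if "USD".toList = k.toList then some "ZUSD"
    else if "EUR".toList = k.toList then some "ZEUR"
    else if "GBP".toList = k.toList then some "ZGBP"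
    else if "JPY".toList = k.toList then some "ZJPY"
    else none := by
  have h : pvQuoteMap = PySem.Dict.mk
    [("USDT", "USDT"), ("ZUSD", "ZUSD"), ("ZEUR", "ZEUR"), ("ZGBP", "ZGBP"), ("ZJPY", "ZJPY"),
     ("USD", "ZUSD"), ("EUR", "ZEUR"), ("GBP", "ZGBP"), ("JPY", "ZJPY")] := by rfl
  rw [h]
  simp only [PySem.Dict.get?_mk_cons, beq_iff_eq, String.ext_iff, String.toList]
  simp [PySem.Dict.get?]

set_option maxHeartbeats 1000000 in
theorem pvA_char (pair : String) : extract_quote_asset_py pair = pvChainA pair.toList := by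
  simp only [extract_quote_asset_py, pvQuoteLoopA, pvChainA,
    PySem.Str.endswith_eq, PySem.Chars.endswith_iff]
  simp
  split_ifs <;> rfl

theorem pv_ite_getD (c : Prop) [Decidable c] (a : String) (o : Option String) (d : String) :
    ((if c then some a else o).getD d) = if c then a else o.getD d := by
  split_ifs <;> rfl

theorem pvLoopB_nil (pair : String) : pvQuoteLoopB pair [] = "" := rfl

theorem pvLoopB_cons (pair : String) (n : Int) (rest : List Int) :
    pvQuoteLoopB pair (n :: rest)
      = (pvQuoteMap.get? (PySem.Str.slice pair (some (-n)) none)).getD (pvQuoteLoopB pair rest) := by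
  rw [pvQuoteLoopB]
  cases pvQuoteMap.get? (PySem.Str.slice pair (some (-n)) none) <;> rfl

set_option maxHeartbeats 8000000 in
theorem pvB_char (pair : String) : extract_quote_asset_py_alt pair = pvChainB pair.toList := by
  have hs4 : (PySem.Str.slice pair (some (-(4:Int))) none).toList
      = pair.toList.drop (pair.toList.length - 4) := by
    rw [PySem.Str.toList_slice, PySem.Chars.slice_eq_listSlice,
        PySem.List.slice_from_neg_ofNat _ 4 (by omega)]
  have hs3 : (PySem.Str.slice pair (some (-(3:Int))) none).toList
      = pair.toList.drop (pair.toList.length - 3) := by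
    rw [PySem.Str.toList_slice, PySem.Chars.slice_eq_listSlice,
        PySem.List.slice_from_neg_ofNat _ 3 (by omega)]
  simp only [extract_quote_asset_py_alt, pvLoopB_cons, pvLoopB_nil]
  rw [get?_pvQuoteMap, get?_pvQuoteMap, hs4, hs3]
  simp only [pv_eq_drop4_iff _ "USDT".toList (by decide), pv_eq_drop4_iff _ "ZUSD".toList (by decide),
    pv_eq_drop4_iff _ "ZEUR".toList (by decide), pv_eq_drop4_iff _ "ZGBP".toList (by decide),
    pv_eq_drop4_iff _ "ZJPY".toList (by decide),
    pv_eq_drop4_three _ "USD".toList (by decide), pv_eq_drop4_three _ "EUR".toList (by decide),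
    pv_eq_drop4_three _ "GBP".toList (by decide), pv_eq_drop4_three _ "JPY".toList (by decide),
    pv_eq_drop3_four _ "USDT".toList (by decide), pv_eq_drop3_four _ "ZUSD".toList (by decide),
    pv_eq_drop3_four _ "ZEUR".toList (by decide), pv_eq_drop3_four _ "ZGBP".toList (by decide),
    pv_eq_drop3_four _ "ZJPY".toList (by decide),
    pv_eq_drop3_iff _ "USD".toList (by decide), pv_eq_drop3_iff _ "EUR".toList (by decide),
    pv_eq_drop3_iff _ "GBP".toList (by decide), pv_eq_drop3_iff _ "JPY".toList (by decide),
    if_false]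
  simp only [pv_ite_getD, Option.getD_none, pvChainB]

-- the two branch orders pick the same answer: distinct equal-length suffixes clash,
-- and a Z-form suffix forces its fiat tail
theorem pvChain_eq (s : List Char) : pvChainA s = pvChainB s := by
  simp only [pvChainA, pvChainB]
  by_cases h1 : ['U', 'S', 'D', 'T'] <:+ s
  · simp [h1]
  by_cases h2 : ['Z', 'U', 'S', 'D'] <:+ s
  · simp [h1, h2]
  by_cases h3 : ['Z', 'E', 'U', 'R'] <:+ s
  · simp [h1, h2, h3]
  by_cases h4 : ['E', 'U', 'R'] <:+ s
  · have hZG : ¬ (['Z', 'G', 'B', 'P'] <:+ s) := fun hz =>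
      pv_ne3 ((by decide : ['G', 'B', 'P'] <:+ ['Z', 'G', 'B', 'P']).trans hz) h4 (by decide) (by decide)
    have hZJ : ¬ (['Z', 'J', 'P', 'Y'] <:+ s) := fun hz =>
      pv_ne3 ((by decide : ['J', 'P', 'Y'] <:+ ['Z', 'J', 'P', 'Y']).trans hz) h4 (by decide) (by decide)
    have hUSD : ¬ (['U', 'S', 'D'] <:+ s) := fun hu => (pv_ne3 hu h4 (by decide) (by decide)).elim
    have hGBP : ¬ (['G', 'B', 'P'] <:+ s) := fun hu => (pv_ne3 hu h4 (by decide) (by decide)).elim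
    have hJPY : ¬ (['J', 'P', 'Y'] <:+ s) := fun hu => (pv_ne3 hu h4 (by decide) (by decide)).elim
    have heU : s ≠ ['U', 'S', 'D'] := fun he => hUSD (by rw [he])
    have heG : s ≠ ['G', 'B', 'P'] := fun he => hGBP (by rw [he])
    have heJ : s ≠ ['J', 'P', 'Y'] := fun he => hJPY (by rw [he])
    simp [h1, h2, h3, h4, hZG, hZJ, hUSD, heU, heG, heJ]
  by_cases h5 : ['Z', 'G', 'B', 'P'] <:+ s
  · simp [h1, h2, h3, h4, h5]
  by_cases h6 : ['G', 'B', 'P'] <:+ s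
  · have hZJ : ¬ (['Z', 'J', 'P', 'Y'] <:+ s) := fun hz =>
      pv_ne3 ((by decide : ['J', 'P', 'Y'] <:+ ['Z', 'J', 'P', 'Y']).trans hz) h6 (by decide) (by decide)
    have hUSD : ¬ (['U', 'S', 'D'] <:+ s) := fun hu => (pv_ne3 hu h6 (by decide) (by decide)).elim
    have hEUR : ¬ (['E', 'U', 'R'] <:+ s) := h4
    have hJPY : ¬ (['J', 'P', 'Y'] <:+ s) := fun hu => (pv_ne3 hu h6 (by decide) (by decide)).elim
    have heU : s ≠ ['U', 'S', 'D'] := fun he => hUSD (by rw [he])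
    have heE : s ≠ ['E', 'U', 'R'] := fun he => hEUR (by rw [he])
    have heJ : s ≠ ['J', 'P', 'Y'] := fun he => hJPY (by rw [he])
    simp [h1, h2, h3, h5, h6, hZJ, hUSD, hEUR, heU, heE, heJ]
  by_cases h7 : ['Z', 'J', 'P', 'Y'] <:+ s
  · simp [h1, h2, h3, h4, h5, h6, h7]
  by_cases h8 : ['J', 'P', 'Y'] <:+ s
  · have hUSD : ¬ (['U', 'S', 'D'] <:+ s) := fun hu => (pv_ne3 hu h8 (by decide) (by decide)).elim
    have hGBP : ¬ (['G', 'B', 'P'] <:+ s) := h6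
    have hEUR : ¬ (['E', 'U', 'R'] <:+ s) := h4
    have heU : s ≠ ['U', 'S', 'D'] := fun he => hUSD (by rw [he])
    have heE : s ≠ ['E', 'U', 'R'] := fun he => hEUR (by rw [he])
    have heG : s ≠ ['G', 'B', 'P'] := fun he => hGBP (by rw [he])
    simp [h1, h2, h3, h5, h7, h8, hUSD, hGBP, hEUR, heU, heE, heG]
  by_cases h9 : ['U', 'S', 'D'] <:+ s
  · have heE : s ≠ ['E', 'U', 'R'] := fun he => h4 (by rw [he])
    have heG : s ≠ ['G', 'B', 'P'] := fun he => h6 (by rw [he])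
    have heJ : s ≠ ['J', 'P', 'Y'] := fun he => h8 (by rw [he])
    simp [h1, h2, h3, h4, h5, h6, h7, h8, h9, heE, heG, heJ]
  · have heU : s ≠ ['U', 'S', 'D'] := fun he => h9 (by rw [he])
    have heE : s ≠ ['E', 'U', 'R'] := fun he => h4 (by rw [he])
    have heG : s ≠ ['G', 'B', 'P'] := fun he => h6 (by rw [he])
    have heJ : s ≠ ['J', 'P', 'Y'] := fun he => h8 (by rw [he])
    simp [h1, h2, h3, h4, h5, h6, h7, h8, h9, heU, heE, heG, heJ]

-- ===== VERDICT (by name: the statement is the Claim_ definition above) =====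
theorem extract_quote_asset_py_spec : Claim_equal_extract_quote_asset_py := by
  intro pair _
  unfold Spec_extract_quote_asset_py
  rw [pvA_char, pvB_char, pvChain_eq]
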